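-- pv_equiv track=rewrite | github.com/Saad-ELH-ELB/Quantum_Classical_OP | AmpEst_Can.py | get_key_of_median_value
-- ===== SOURCE A (Python) =====
-- def get_key_of_median_value(d):
--     # Step 1: Sort the dictionary by keys
--     sorted_dict = sorted(d.items())
--
--     # Step 2: Expand the sorted dictionary into a list
--     expanded_list = []
--     for key, count in sorted_dict:
--         expanded_list.extend([key] * count)
--
--     # Step 3: Find the median index
--     n = len(expanded_list)
--     median_index = n // 2  # integer division gives the middle index
--
--     # Step 4: Return the median key
--     return expanded_list[median_index]
-- ===== SOURCE B (Python) =====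
-- def get_key_of_median_value(d):
--     # Weighted median of a count dictionary: the median index is total // 2;
--     # scan the bins in key order, accumulating counts (empty bins are skipped),
--     # and return the first key whose cumulative count covers that index.
--     total = sum(c for c in d.values() if c > 0)
--     mid = total // 2
--     acc = 0
--     for key, count in sorted(d.items()):
--         if count > 0:
--             acc += count
--             if acc > mid:
--                 return key
-- ===== Notes on version B (the rewrite author's own statement) =====
-- stated objective: alternative
-- what changed: Instead of materialising a list with one copy of each key per count and indexing its middle, B scans the key-sorted bins accumulating counts and returns the first key whose cumulative count exceeds total//2, so no expanded list is built; Pre_ excludes inputs with no positive count, on which A raises IndexError (B's loop finds no bin and returns None).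
import Mathlib
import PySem

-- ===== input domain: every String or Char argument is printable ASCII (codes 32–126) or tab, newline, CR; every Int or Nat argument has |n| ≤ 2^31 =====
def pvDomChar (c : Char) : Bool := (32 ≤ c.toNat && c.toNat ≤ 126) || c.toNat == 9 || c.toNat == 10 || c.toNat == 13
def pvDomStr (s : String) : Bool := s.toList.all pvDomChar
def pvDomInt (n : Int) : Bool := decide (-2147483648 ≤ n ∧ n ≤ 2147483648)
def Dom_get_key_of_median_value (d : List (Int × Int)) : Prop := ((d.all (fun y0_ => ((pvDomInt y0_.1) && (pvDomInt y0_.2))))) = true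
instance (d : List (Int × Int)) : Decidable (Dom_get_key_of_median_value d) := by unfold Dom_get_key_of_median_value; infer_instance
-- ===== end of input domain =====

-- B replaces A's count-weighted expansion of the keys by a cumulative-count scan
-- over the key-sorted bins, so the expanded list is never built (objective: alternative).

-- ===== PORT A =====
-- d is a dict, so its keys are distinct and Python's tuple sort of d.items()
-- is exactly a (stable) sort by key.
def get_key_of_median_value (d : List (Int × Int)) : Int :=
  let sorted_dict := PySem.List.sorted d (fun p => p.1) false
  -- [key] * count: Int.toNat clamps a negative count to 0, exactly like Python's list repetition
  let expanded_list := sorted_dict.foldl (fun acc kc => acc ++ List.replicate kc.2.toNat kc.1) []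
  let n : Int := expanded_list.length
  let median_index := PySem.Int.floordiv n 2
  -- expanded_list[median_index]; Pre_ guarantees the index is in range (else Python raises IndexError)
  (PySem.List.pyGet? expanded_list median_index).getD 0

-- ===== PORT B =====
-- the for-loop of Source B: bins with count > 0 accumulate into acc; the first key
-- with acc > mid is returned.  Source B's loop falling off the end returns None,
-- which is outside Pre_; the port returns 0 there.
def pvScan (items : List (Int × Int)) (mid acc : Int) : Int :=
  match items with
  | [] => 0
  | (key, count) :: rest =>
    if 0 < count then
      let acc' := acc + count
      if mid < acc' then key else pvScan rest mid acc'
    else pvScan rest mid acc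

def get_key_of_median_value_alt (d : List (Int × Int)) : Int :=
  let total := d.foldl (fun a p => a + if 0 < p.2 then p.2 else 0) 0
  let mid := PySem.Int.floordiv total 2
  pvScan (PySem.List.sorted d (fun p => p.1) false) mid 0

-- ===== PRECONDITION & SPEC =====
-- Pre_: some count is positive, i.e. A's expanded list is nonempty; otherwise
-- Python A raises IndexError (and Python B's loop finds no bin and returns None).
def Pre_get_key_of_median_value (d : List (Int × Int)) : Prop :=
  0 < (d.map (fun p => max p.2 0)).sum
instance (d : List (Int × Int)) : Decidable (Pre_get_key_of_median_value d) := by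
  unfold Pre_get_key_of_median_value; infer_instance

def pvWitness_get_key_of_median_value : (List (Int × Int)) := [(1, 2), (0, 1)]

def Spec_get_key_of_median_value (d : List (Int × Int)) (out : Int) : Prop := out = get_key_of_median_value_alt d
instance (d : List (Int × Int)) (out : Int) : Decidable (Spec_get_key_of_median_value d out) := by unfold Spec_get_key_of_median_value; infer_instance

-- ===== CLAIM (what is proved, stated in full; the proofs are below) =====
def Claim_equal_get_key_of_median_value : Prop := ∀ (d : List (Int × Int)), Dom_get_key_of_median_value d → Pre_get_key_of_median_value d → Spec_get_key_of_median_value d (get_key_of_median_value d)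

-- ===== LEMMAS AND PROOFS =====

-- A's expansion, written as a flatMap
def pvExpand (l : List (Int × Int)) : List Int :=
  l.flatMap (fun kc => List.replicate kc.2.toNat kc.1)

theorem pvFoldl_expand (l : List (Int × Int)) (init : List Int) :
    l.foldl (fun acc kc => acc ++ List.replicate kc.2.toNat kc.1) init = init ++ pvExpand l := by
  induction l generalizing init with
  | nil => simp [pvExpand]
  | cons kc rest ih => simp [pvExpand, List.foldl_cons, ih, List.flatMap_cons]

theorem pvFoldl_total (l : List (Int × Int)) (acc : Int) :
    l.foldl (fun a p => a + if 0 < p.2 then p.2 else 0) acc = acc + ((pvExpand l).length : Int) := by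
  induction l generalizing acc with
  | nil => simp [pvExpand]
  | cons kc rest ih =>
    simp only [pvExpand, List.foldl_cons, ih, List.flatMap_cons, List.length_append,
      List.length_replicate]
    push_cast
    simp only [Int.ofNat_toNat]
    split_ifs with h <;> omega

-- B's scan returns the element of A's expanded list at index mid - acc
theorem pvScan_eq_getD (l : List (Int × Int)) (mid acc : Int)
    (h0 : 0 ≤ mid - acc) (h1 : mid - acc < ((pvExpand l).length : Int)) :
    pvScan l mid acc = (pvExpand l).getD (mid - acc).toNat 0 := by
  induction l generalizing acc with
  | nil => simp [pvExpand] at h1; omega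
  | cons kc rest ih =>
    obtain ⟨key, count⟩ := kc
    have hsplit : pvExpand ((key, count) :: rest) = List.replicate count.toNat key ++ pvExpand rest := by
      simp [pvExpand]
    have hlen : (pvExpand ((key, count) :: rest)).length = count.toNat + (pvExpand rest).length := by
      rw [hsplit]; simp
    rw [hsplit,
      show pvScan ((key, count) :: rest) mid acc
        = if 0 < count then (if mid < acc + count then key else pvScan rest mid (acc + count))
          else pvScan rest mid acc from rfl]
    by_cases hpos : 0 < count
    · rw [if_pos hpos]
      by_cases hlt : mid < acc + count
      · rw [if_pos hlt]
        have hidx : (mid - acc).toNat < count.toNat := by omega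
        rw [List.getD_append _ _ _ _ (by simpa using hidx)]
        simp [List.getD, hidx]
      · rw [if_neg hlt]
        have h1' : mid - (acc + count) < ((pvExpand rest).length : Int) := by
          rw [hlen] at h1; push_cast at h1; omega
        rw [List.getD_append_right _ _ _ _ (by simp only [List.length_replicate]; omega)]
        rw [ih (acc + count) (by omega) h1']
        congr 1
        simp only [List.length_replicate]
        omega
    · rw [if_neg hpos]
      have hz : count.toNat = 0 := by omega
      have h1' : mid - acc < ((pvExpand rest).length : Int) := by
        rw [hlen, hz] at h1; push_cast at h1; omega
      rw [List.getD_append_right _ _ _ _ (by simp [hz]),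
        ih acc h0 h1']
      congr 1
      simp [hz]

-- the sum of the clamped counts is the length of the expanded list
theorem pvSum_eq_len (l : List (Int × Int)) :
    (l.map (fun p => max p.2 0)).sum = ((pvExpand l).length : Int) := by
  induction l with
  | nil => simp [pvExpand]
  | cons kc rest ih =>
    simp only [pvExpand, List.flatMap_cons, List.length_append, List.length_replicate,
      List.map_cons, List.sum_cons]
    simp only [pvExpand] at ih
    push_cast
    simp only [Int.ofNat_toNat]
    omega

-- ===== VERDICT (by name: the statement is the Claim_ definition above) =====
theorem get_key_of_median_value_spec : Claim_equal_get_key_of_median_value := by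
  intro d _ hpre
  unfold Spec_get_key_of_median_value get_key_of_median_value get_key_of_median_value_alt
  simp only [pvFoldl_expand, pvFoldl_total, List.nil_append, zero_add]
  set s := PySem.List.sorted d (fun p => p.1) false with hs
  have hperm : s.Perm d := PySem.List.sorted_perm ..
  have hlen_eq : ((pvExpand d).length : Int) = ((pvExpand s).length : Int) := by
    have h := (hperm.map (fun kc : Int × Int => (List.replicate kc.2.toNat kc.1).length)).sum_eq
    simp only [pvExpand, List.length_flatMap]
    omega
  have htot : 0 < ((pvExpand s).length : Int) := by
    unfold Pre_get_key_of_median_value at hpre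
    rw [pvSum_eq_len d, hlen_eq] at hpre
    exact hpre
  rw [hlen_eq]
  set N : Int := ((pvExpand s).length : Int) with hN
  have hmid : PySem.Int.floordiv N 2 = N / 2 :=
    PySem.Int.floordiv_eq_ediv_of_pos (by omega)
  rw [hmid]
  have hb0 : 0 ≤ N / 2 := by omega
  have hb1 : N / 2 < N := by omega
  have hscan := pvScan_eq_getD s (N / 2) 0 (by omega) (by omega)
  simp only [Int.sub_zero] at hscan
  rw [PySem.List.pyGet?_of_nonneg _ hb0, hscan]
  simp [List.getD]
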